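-- pv_equiv track=rewrite | github.com/melvincabatuan/PythonRefresher | hello_python5.py | binary_counter2
-- ===== SOURCE A (Python) =====
-- def binary_counter2(n):
--   '''
--   Returns a list of strings that resembles binary counting starting
--   from zero up to the input number.
--   '''
--
--   if type(n) is not int:
--     raise TypeError("Please input an integer")
--
--   result = []
--   if n >= 0:
--     for i in range(n+1):
--       result.append(bin(i)[2:])
--   return result
-- ===== SOURCE B (Python) =====
-- def binary_counter2(n):
--   '''
--   Returns a list of strings that resembles binary counting starting
--   from zero up to the input number.
--   '''
--
--   if type(n) is not int:
--     raise TypeError("Please input an integer")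
--
--   if n < 0:
--     return []
--   result = []
--   bits = ['0']  # current counter value, most-significant bit first
--   for _ in range(n + 1):
--     result.append(''.join(bits))
--     # ripple-carry increment: flip trailing '1's, set the first '0' from the end
--     j = len(bits) - 1
--     while j >= 0 and bits[j] == '1':
--       bits[j] = '0'
--       j -= 1
--     if j >= 0:
--       bits[j] = '1'
--     else:
--       bits.insert(0, '1')
--   return result
-- ===== Notes on version B (the rewrite author's own statement) =====
-- stated objective: alternative
-- what changed: Instead of formatting each i independently with bin(i)[2:], B maintains the counter's bit list and derives each string from the previous one by a ripple-carry increment.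
import Mathlib
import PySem

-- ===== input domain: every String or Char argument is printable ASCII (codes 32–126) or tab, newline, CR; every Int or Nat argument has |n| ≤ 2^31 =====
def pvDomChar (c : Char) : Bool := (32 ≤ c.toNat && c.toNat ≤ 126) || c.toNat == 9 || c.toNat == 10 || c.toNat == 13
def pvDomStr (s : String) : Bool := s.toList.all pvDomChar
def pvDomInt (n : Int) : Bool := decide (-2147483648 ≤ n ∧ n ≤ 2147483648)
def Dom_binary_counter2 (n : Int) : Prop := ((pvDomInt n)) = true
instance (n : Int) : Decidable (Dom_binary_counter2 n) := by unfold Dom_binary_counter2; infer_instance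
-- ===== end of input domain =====

-- B replaces per-element bin(i)[2:] formatting by a stateful ripple-carry increment of a bit list (alternative algorithm, same cost).


-- ===== PORT A =====
-- bin(i)[2:] for a nonnegative i: most-significant-bit-first digit list ([] for 0)
def binA_digits : Nat → List Char
  | 0 => []
  | (k+1) => binA_digits ((k+1)/2) ++ [if (k+1) % 2 = 1 then '1' else '0']
decreasing_by exact Nat.div_lt_self (Nat.succ_pos _) one_lt_two

def pyBin (i : Nat) : String := if i = 0 then "0" else String.mk (binA_digits i)

def binary_counter2 (n : Int) : List String :=
  if 0 ≤ n then
    (PySem.List.pyRange 0 (n+1) 1).foldl (fun acc i => acc ++ [pyBin i.toNat]) []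
  else []

-- ===== PORT B =====
-- the 'while j >= 0 and bits[j] == '1'' scan from the end of the bit list,
-- expressed as recursion on the reversed list; incR [] = ['1'] is the
-- bits.insert(0,'1') branch (all bits were '1')
def incR : List Char → List Char
  | [] => ['1']
  | c :: t => if c = '1' then '0' :: incR t else '1' :: t

def incBits (bs : List Char) : List Char := (incR bs.reverse).reverse

def loopB : Nat → List Char → List String → List String
  | 0, _, acc => acc
  | (k+1), bits, acc => loopB k (incBits bits) (acc ++ [String.mk bits])

def binary_counter2_alt (n : Int) : List String :=
  if n < 0 then [] else loopB (n+1).toNat ['0'] []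

-- ===== PRECONDITION & SPEC =====
def Spec_binary_counter2 (n : Int) (out : List String) : Prop := out = binary_counter2_alt n
instance (n : Int) (out : List String) : Decidable (Spec_binary_counter2 n out) := by unfold Spec_binary_counter2; infer_instance

-- ===== CLAIM (what is proved, stated in full; the proofs are below) =====
def Claim_equal_binary_counter2 : Prop := ∀ (n : Int), Dom_binary_counter2 n → Spec_binary_counter2 n (binary_counter2 n)

-- ===== LEMMAS AND PROOFS =====

-- least-significant-bit-first digits, the shape incR recurses on
def bitsR : Nat → List Char
  | 0 => []
  | (k+1) => (if (k+1) % 2 = 1 then '1' else '0') :: bitsR ((k+1)/2)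
decreasing_by exact Nat.div_lt_self (Nat.succ_pos _) one_lt_two

theorem binA_digits_reverse (m : Nat) : (binA_digits m).reverse = bitsR m := by
  induction m using Nat.strong_induction_on with
  | _ m ih =>
    match m with
    | 0 => simp [binA_digits, bitsR]
    | k+1 =>
      rw [binA_digits, bitsR, List.reverse_append]
      simp [ih ((k+1)/2) (Nat.div_lt_self (Nat.succ_pos _) one_lt_two)]

theorem incR_bitsR (m : Nat) : incR (bitsR m) = bitsR (m+1) := by
  induction m using Nat.strong_induction_on with
  | _ m ih =>
    match m with
    | 0 => simp [bitsR, incR]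
    | k+1 =>
      rw [bitsR]
      by_cases h : (k+1) % 2 = 1
      · rw [if_pos h, incR, if_pos rfl,
          ih ((k+1)/2) (Nat.div_lt_self (Nat.succ_pos _) one_lt_two)]
        conv_rhs => rw [bitsR]
        have h2 : (k+1+1) % 2 = 0 := by omega
        have h3 : (k+1+1) / 2 = (k+1)/2 + 1 := by omega
        rw [h2, h3]
        simp
      · rw [if_neg h, incR, if_neg (by decide)]
        conv_rhs => rw [bitsR]
        have h2 : (k+1+1) % 2 = 1 := by omega
        have h3 : (k+1+1) / 2 = (k+1)/2 := by omega
        rw [h2, h3]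
        simp

-- the bit list held by B's loop after m increments
def rep (m : Nat) : List Char := if m = 0 then ['0'] else binA_digits m

theorem binA_digits_eq (m : Nat) : binA_digits m = (bitsR m).reverse := by
  rw [← binA_digits_reverse, List.reverse_reverse]

theorem incBits_rep (m : Nat) : incBits (rep m) = rep (m+1) := by
  match m with
  | 0 => simp [rep, incBits, incR, binA_digits]
  | k+1 =>
    show incBits (binA_digits (k+1)) = binA_digits (k+1+1)
    rw [incBits, binA_digits_reverse, incR_bitsR, binA_digits_eq]

theorem mk_rep (m : Nat) : String.mk (rep m) = pyBin m := by
  match m with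
  | 0 => rfl
  | k+1 => rfl

theorem loopB_eq (k : Nat) : ∀ (m : Nat) (acc : List String),
    loopB k (rep m) acc = acc ++ (List.range k).map (fun j => pyBin (m+j)) := by
  induction k with
  | zero => intro m acc; simp [loopB]
  | succ k ih =>
    intro m acc
    rw [loopB, incBits_rep, mk_rep, ih (m+1), List.range_succ_eq_map]
    have : (fun j => pyBin (m + Nat.succ j)) = (fun j => pyBin (m+1+j)) := by
      funext j; congr 1; omega
    simp [List.map_map, Function.comp_def, this]

-- ===== VERDICT (by name: the statement is the Claim_ definition above) =====
theorem binary_counter2_spec : Claim_equal_binary_counter2 := by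
  intro n _
  unfold Spec_binary_counter2 binary_counter2 binary_counter2_alt
  by_cases h : 0 ≤ n
  · rw [if_pos h, if_neg (by omega), PySem.List.foldl_append_singleton_eq_map,
      PySem.List.pyRange_one]
    have h0 : loopB (n+1).toNat ['0'] [] = loopB (n+1).toNat (rep 0) [] := rfl
    rw [h0, loopB_eq]
    simp [List.map_map, Function.comp_def]
  · rw [if_neg h, if_pos (by omega)]
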